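-- pv_equiv track=rewrite | github.com/wroblewskiwojciech161/Studies | python course/lab2/zad5_pro.py | split_into_table
-- ===== SOURCE A (Python) =====
-- def split_into_table(tab):
--     output=[]
--     temp=""
--     for i in range (0,len(tab)):
--         temp=temp+ str(tab[i])
--     for i in range (0,len(temp)):
--         output.append(temp[i])
--     return output
-- ===== SOURCE B (Python) =====
-- def split_into_table(tab):
--     output = []
--     for x in tab:
--         output.extend(str(x))
--     return output
-- ===== Notes on version B (the rewrite author's own statement) =====
-- stated objective: simpler
-- what changed: B drops A's intermediate concatenated string and its second index loop: a single fused pass extends the output with the characters of str(x) for each element directly.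
import Mathlib
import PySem

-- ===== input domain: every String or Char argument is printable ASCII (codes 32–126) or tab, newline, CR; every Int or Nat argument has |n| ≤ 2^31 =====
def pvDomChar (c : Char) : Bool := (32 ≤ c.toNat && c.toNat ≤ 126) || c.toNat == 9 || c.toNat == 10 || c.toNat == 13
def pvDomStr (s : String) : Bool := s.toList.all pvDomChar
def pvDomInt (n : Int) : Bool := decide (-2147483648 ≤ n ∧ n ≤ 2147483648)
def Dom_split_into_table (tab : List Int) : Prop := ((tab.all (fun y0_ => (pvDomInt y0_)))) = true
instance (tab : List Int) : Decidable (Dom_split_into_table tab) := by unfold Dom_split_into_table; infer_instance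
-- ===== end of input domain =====

-- B replaces A's build-a-temp-string-then-index-it-again two-pass with a single fused loop that extends the output with the characters of str(x) directly (objective: simpler).


-- ===== PORT A =====
def split_into_table (tab : List Int) : List String :=
  let temp : String :=
    (PySem.List.pyRange 0 tab.length 1).foldl
      (fun temp i => temp ++ PySem.Int.toStr (PySem.List.pyGetD tab i 0)) ""
  (PySem.List.pyRange 0 temp.toList.length 1).foldl
    (fun output i => output ++ [String.mk [PySem.List.pyGetD temp.toList i ' ']]) []

-- ===== PORT B =====
def split_into_table_alt (tab : List Int) : List String :=
  tab.foldl (fun output x => output ++ (PySem.Int.toStr x).toList.map (fun c => String.mk [c])) []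

-- ===== PRECONDITION & SPEC =====
def Spec_split_into_table (tab : List Int) (out : List String) : Prop := out = split_into_table_alt tab
instance (tab : List Int) (out : List String) : Decidable (Spec_split_into_table tab out) := by unfold Spec_split_into_table; infer_instance

-- ===== CLAIM (what is proved, stated in full; the proofs are below) =====
def Claim_equal_split_into_table : Prop := ∀ (tab : List Int), Dom_split_into_table tab → Spec_split_into_table tab (split_into_table tab)

-- ===== LEMMAS AND PROOFS =====

-- ===== VERDICT (by name: the statement is the Claim_ definition above) =====
lemma concat_foldl_toList (tab : List Int) (s : String) :
    (tab.foldl (fun t x => t ++ PySem.Int.toStr x) s).toList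
      = s.toList ++ tab.flatMap (fun x => (PySem.Int.toStr x).toList) := by
  induction tab generalizing s with
  | nil => simp
  | cons x xs ih => simp [List.foldl_cons, ih]

lemma second_loop (temp : List Char) :
    (PySem.List.pyRange 0 (temp.length : Int) 1).foldl
      (fun output i => output ++ [String.mk [PySem.List.pyGetD temp i ' ']]) []
      = temp.map (fun c => String.mk [c]) := by
  rw [PySem.List.foldl_pyRange_zero_pyGetD' temp ' '
      (fun output c => output ++ [String.mk [c]]) [],
    PySem.List.foldl_append_singleton_eq_map]
  simp

theorem split_into_table_spec : Claim_equal_split_into_table := by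
  intro tab _
  show (let temp := (PySem.List.pyRange 0 (tab.length : Int) 1).foldl
          (fun temp i => temp ++ PySem.Int.toStr (PySem.List.pyGetD tab i 0)) ""
        (PySem.List.pyRange 0 (temp.toList.length : Int) 1).foldl
          (fun output i => output ++ [String.mk [PySem.List.pyGetD temp.toList i ' ']]) [])
      = split_into_table_alt tab
  simp only [second_loop]
  rw [PySem.List.foldl_pyRange_zero_pyGetD' tab 0
      (fun t x => t ++ PySem.Int.toStr x) "", concat_foldl_toList]
  unfold split_into_table_alt
  rw [PySem.List.foldl_append_eq_flatMap (fun x => (PySem.Int.toStr x).toList.map (fun c => String.mk [c]))]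
  simp [List.map_flatMap]
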